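-- pv_equiv track=rewrite | github.com/yossisegev/openshift-virtualization-tests | scripts/tests_analyzer/pytest_marker_analyzer.py | _expand_modified_members_transitively
-- ===== SOURCE A (Python) =====
-- def _expand_modified_members_transitively(
--     directly_modified: set[str],
--     internal_calls: dict[str, set[str]],
-- ) -> set[str]:
--     """Expand modified members to include transitive callers.
--
--     If method A calls self.B() and B is modified, A is transitively affected.
--     Uses fixed-point iteration.
--
--     Args:
--         directly_modified: Set of directly modified member names.
--         internal_calls: Mapping of method -> set of self.X() callees.
--
--     Returns:
--         Expanded set including transitive callers.
--     """
--     expanded = set(directly_modified)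
--     changed = True
--     while changed:
--         changed = False
--         for caller, callees in internal_calls.items():
--             if caller not in expanded and callees & expanded:
--                 expanded.add(caller)
--                 changed = True
--     return expanded
-- ===== SOURCE B (Python) =====
-- def _expand_modified_members_transitively(
--     directly_modified: set[str],
--     internal_calls: dict[str, set[str]],
-- ) -> set[str]:
--     """Expand modified members to include transitive callers.
--
--     Reverse-reachability: build a callee -> callers adjacency once, then
--     expand from the seed set with a worklist (DFS); each reverse edge is
--     examined at most once, instead of rescanning the whole call map until
--     a fixed point is reached.
--     """
--     callers_of: dict[str, list[str]] = {}
--     for caller, callees in internal_calls.items():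
--         for callee in callees:
--             callers_of.setdefault(callee, []).append(caller)
--     expanded = set(directly_modified)
--     stack = list(directly_modified)
--     while stack:
--         member = stack.pop()
--         for caller in callers_of.get(member, []):
--             if caller not in expanded:
--                 expanded.add(caller)
--                 stack.append(caller)
--     return expanded
-- ===== Notes on version B (the rewrite author's own statement) =====
-- stated objective: alternative
-- what changed: Replaces A's repeated fixed-point sweeps over the whole call map by a one-time reverse adjacency (callee -> callers) plus a worklist traversal from the seeds, so each reverse edge is examined at most once.
import Mathlib
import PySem

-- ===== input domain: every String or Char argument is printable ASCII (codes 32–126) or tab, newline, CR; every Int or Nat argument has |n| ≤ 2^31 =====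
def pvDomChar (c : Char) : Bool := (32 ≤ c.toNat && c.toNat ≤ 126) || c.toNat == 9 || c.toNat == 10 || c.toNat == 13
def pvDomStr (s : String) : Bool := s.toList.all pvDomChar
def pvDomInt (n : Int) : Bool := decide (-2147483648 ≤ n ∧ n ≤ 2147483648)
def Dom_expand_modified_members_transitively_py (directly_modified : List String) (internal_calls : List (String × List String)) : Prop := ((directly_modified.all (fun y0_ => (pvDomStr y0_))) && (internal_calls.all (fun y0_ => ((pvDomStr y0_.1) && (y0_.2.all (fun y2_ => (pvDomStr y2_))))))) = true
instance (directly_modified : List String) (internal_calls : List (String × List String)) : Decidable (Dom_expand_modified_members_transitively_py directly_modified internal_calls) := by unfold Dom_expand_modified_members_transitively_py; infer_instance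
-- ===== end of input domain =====

-- B replaces A's repeated fixed-point sweeps over the whole call map by a one-time reverse
-- (callee -> callers) adjacency plus a worklist traversal from the seeds (each reverse edge
-- examined at most once). The Python function returns a SET (no iteration order is defined
-- on it), so both ports return the canonical sorted listing of the computed set.

-- Input decoding shared by both ports: the Python argument `internal_calls` is a dict
-- (built from the association list with overwrite-in-place), `directly_modified` is a set.
def pvCallDict (internal_calls : List (String × List String)) : PySem.Dict String (List String) :=
  internal_calls.foldl (fun d p => d.insert p.1 p.2) PySem.Dict.empty

-- ===== PORT A =====
-- Python's truthiness test `callees & expanded` (non-empty intersection).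
def pvHit (s : PySem.Set String) (p : String × List String) : Bool :=
  !(PySem.Set.inter (PySem.Set.ofList p.2) s).isEmpty

-- body of A's `for caller, callees in internal_calls.items():`
def pvStepA (st : PySem.Set String × Bool) (p : String × List String) : PySem.Set String × Bool :=
  if !(PySem.Set.contains st.1 p.1) && pvHit st.1 p then (PySem.Set.add st.1 p.1, true) else st

-- A's `while changed:` loop; fuel bounds the number of passes (each changed pass adds at
-- least one of the dict's keys, so `items.length + 1` passes always reach the unchanged pass).
def pvLoopA (items : List (String × List String)) : Nat → PySem.Set String → PySem.Set String
  | 0, exp => exp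
  | n + 1, exp =>
    let st := items.foldl pvStepA (exp, false)
    if st.2 then pvLoopA items n st.1 else st.1

def expand_modified_members_transitively_py (directly_modified : List String) (internal_calls : List (String × List String)) : List String :=
  let items := (pvCallDict internal_calls).items
  PySem.List.sorted (pvLoopA items (items.length + 1) (PySem.Set.ofList directly_modified)) (fun x => x) false

-- ===== PORT B =====
-- B's reverse adjacency: `callers_of.setdefault(callee, []).append(caller)` over all items
-- (each callees value is a Python set, hence iterated over its distinct elements).
def pvRev (items : List (String × List String)) : PySem.Dict String (List String) :=
  items.foldl
    (fun d p => (PySem.Set.ofList p.2).foldl (fun d c => d.modify c [] (fun l => l ++ [p.1])) d)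
    PySem.Dict.empty

-- body of B's `for caller in callers_of.get(member, []):` (the worklist is kept top-at-head;
-- Python keeps it top-at-end — the traversal order is not observable in the returned set).
def pvVisit (st : PySem.Set String × List String) (c : String) : PySem.Set String × List String :=
  if PySem.Set.contains st.1 c then st else (PySem.Set.add st.1 c, c :: st.2)

-- B's `while stack:` loop; fuel bounds the number of pops (each pop either consumes a stack
-- entry or first pushes strings newly added to `expanded`, which all lie in seeds ∪ keys).
def pvBFS (rev : PySem.Dict String (List String)) : Nat → List String → PySem.Set String → PySem.Set String
  | 0, _, exp => exp
  | _ + 1, [], exp => exp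
  | n + 1, m :: stack, exp =>
    let st := (rev.getD m []).foldl pvVisit (exp, stack)
    pvBFS rev n st.2 st.1

def expand_modified_members_transitively_py_alt (directly_modified : List String) (internal_calls : List (String × List String)) : List String :=
  let items := (pvCallDict internal_calls).items
  let rev := pvRev items
  let seeds := PySem.Set.ofList directly_modified
  PySem.List.sorted (pvBFS rev (2 * (seeds.length + items.length) + 1) seeds seeds) (fun x => x) false

-- ===== PRECONDITION & SPEC =====
def Spec_expand_modified_members_transitively_py (directly_modified : List String) (internal_calls : List (String × List String)) (out : List String) : Prop := out = expand_modified_members_transitively_py_alt directly_modified internal_calls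
instance (directly_modified : List String) (internal_calls : List (String × List String)) (out : List String) : Decidable (Spec_expand_modified_members_transitively_py directly_modified internal_calls out) := by unfold Spec_expand_modified_members_transitively_py; infer_instance

-- ===== CLAIM (what is proved, stated in full; the proofs are below) =====
def Claim_equal_expand_modified_members_transitively_py : Prop := ∀ (directly_modified : List String) (internal_calls : List (String × List String)), Dom_expand_modified_members_transitively_py directly_modified internal_calls → Spec_expand_modified_members_transitively_py directly_modified internal_calls (expand_modified_members_transitively_py directly_modified internal_calls)

-- ===== LEMMAS AND PROOFS =====

-- `S` is closed under the call map: a caller with a modified callee is itself modified.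
def pvClosed (items : List (String × List String)) (S : List String) : Prop :=
  ∀ p ∈ items, (∃ c ∈ p.2, c ∈ S) → p.1 ∈ S

lemma pvHit_iff (s : PySem.Set String) (p : String × List String) :
    pvHit s p = true ↔ ∃ c ∈ p.2, c ∈ s := by
  unfold pvHit
  rw [Bool.not_eq_true', List.isEmpty_eq_false_iff_exists_mem]
  constructor
  · rintro ⟨c, hc⟩
    rcases (PySem.Set.mem_inter _ _ _).mp hc with ⟨h1, h2⟩
    exact ⟨c, (PySem.Set.mem_ofList _ _).mp h1, h2⟩
  · rintro ⟨c, hc1, hc2⟩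
    exact ⟨c, (PySem.Set.mem_inter _ _ _).mpr ⟨(PySem.Set.mem_ofList _ _).mpr hc1, hc2⟩⟩

-- A-side: membership facts about one pass and about the loop
lemma pvFoldA_mono (items : List (String × List String)) :
    ∀ (st : PySem.Set String × Bool) (x : String), x ∈ st.1 → x ∈ (items.foldl pvStepA st).1 := by
  induction items with
  | nil => intro st x hx; exact hx
  | cons p rest ih =>
    intro st x hx
    rw [List.foldl_cons]
    refine ih _ x ?_
    simp only [pvStepA]
    split
    · exact (PySem.Set.mem_add st.1 p.1 x).mpr (Or.inl hx)
    · exact hx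

lemma pvFoldA_nodup (items : List (String × List String)) :
    ∀ (st : PySem.Set String × Bool), st.1.Nodup → (items.foldl pvStepA st).1.Nodup := by
  induction items with
  | nil => intro st h; exact h
  | cons p rest ih =>
    intro st h
    rw [List.foldl_cons]
    refine ih _ ?_
    simp only [pvStepA]
    split
    · exact PySem.Set.nodup_add st.1 p.1 h
    · exact h

lemma pvFoldA_sub (items : List (String × List String)) (S : List String)
    (hS : pvClosed items S) :
    ∀ (st : PySem.Set String × Bool), (∀ x ∈ st.1, x ∈ S) →
      ∀ x ∈ (items.foldl pvStepA st).1, x ∈ S := by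
  have key : ∀ (l : List (String × List String)),
      (∀ p ∈ l, (∃ c ∈ p.2, c ∈ S) → p.1 ∈ S) →
      ∀ (st : PySem.Set String × Bool), (∀ x ∈ st.1, x ∈ S) →
        ∀ x ∈ (l.foldl pvStepA st).1, x ∈ S := by
    intro l
    induction l with
    | nil => intro _ st h; exact h
    | cons p rest ih =>
      intro hl st h
      rw [List.foldl_cons]
      refine ih (fun q hq => hl q (List.mem_cons_of_mem _ hq)) _ ?_
      simp only [pvStepA]
      split
      · rename_i hcond
        intro x hx
        rcases (PySem.Set.mem_add st.1 p.1 x).mp hx with hx | hx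
        · exact h x hx
        · subst hx
          have hhit : pvHit st.1 p = true := (Bool.and_eq_true_iff.mp hcond).2
          rcases (pvHit_iff st.1 p).mp hhit with ⟨c, hc1, hc2⟩
          exact hl p List.mem_cons_self ⟨c, hc1, h c hc2⟩
      · exact h
  exact key items hS

lemma pvFoldA_flag_mono (items : List (String × List String)) :
    ∀ (s : PySem.Set String), (items.foldl pvStepA (s, true)).2 = true := by
  induction items with
  | nil => intro s; rfl
  | cons p rest ih =>
    intro s
    rw [List.foldl_cons]
    simp only [pvStepA]
    split
    · exact ih _
    · exact ih _

lemma pvFoldA_unchanged (items : List (String × List String)) (s : PySem.Set String)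
    (h : (items.foldl pvStepA (s, false)).2 = false) :
    (items.foldl pvStepA (s, false)).1 = s ∧
      ∀ p ∈ items, PySem.Set.contains s p.1 = true ∨ pvHit s p = false := by
  induction items generalizing s with
  | nil => exact ⟨rfl, by simp⟩
  | cons p rest ih =>
    rw [List.foldl_cons] at h ⊢
    by_cases hcond : (!(PySem.Set.contains s p.1) && pvHit s p) = true
    · exfalso
      have hstep : pvStepA (s, false) p = (PySem.Set.add s p.1, true) := by
        simp only [pvStepA]; rw [if_pos hcond]
      rw [hstep] at h
      rw [pvFoldA_flag_mono rest (PySem.Set.add s p.1)] at h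
      exact absurd h (by simp)
    · have hstep : pvStepA (s, false) p = (s, false) := by
        simp only [pvStepA]; rw [if_neg hcond]
      rw [hstep] at h
      rcases ih _ h with ⟨h1, h2⟩
      refine ⟨by rw [hstep]; exact h1, ?_⟩
      intro q hq
      rcases List.mem_cons.mp hq with hq | hq
      · subst hq
        cases hc : PySem.Set.contains s q.1
        · right
          cases hh : pvHit s q
          · rfl
          · exact absurd (by rw [hc, hh]; rfl) hcond
        · exact Or.inl rfl
      · exact h2 q hq

lemma pvContains_eq_false_iff (s : PySem.Set String) (x : String) :
    PySem.Set.contains s x = false ↔ x ∉ s := by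
  rw [← PySem.Set.contains_iff]
  cases PySem.Set.contains s x <;> simp

lemma pvFoldA_changed_witness (items : List (String × List String)) :
    ∀ (s : PySem.Set String), (items.foldl pvStepA (s, false)).2 = true →
      ∃ p ∈ items, PySem.Set.contains s p.1 = false ∧ p.1 ∈ (items.foldl pvStepA (s, false)).1 := by
  induction items with
  | nil => intro s h; simp at h
  | cons p rest ih =>
    intro s h
    by_cases hcond : (!(PySem.Set.contains s p.1) && pvHit s p) = true
    · have hstep : pvStepA (s, false) p = (PySem.Set.add s p.1, true) := by
        simp only [pvStepA]; rw [if_pos hcond]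
      have hcf : PySem.Set.contains s p.1 = false := by
        cases hcv : PySem.Set.contains s p.1
        · rfl
        · rw [hcv] at hcond; simp at hcond
      refine ⟨p, List.mem_cons_self, hcf, ?_⟩
      rw [List.foldl_cons, hstep]
      exact pvFoldA_mono rest _ p.1 ((PySem.Set.mem_add s p.1 p.1).mpr (Or.inr rfl))
    · have hstep : pvStepA (s, false) p = (s, false) := by
        simp only [pvStepA]; rw [if_neg hcond]
      rw [List.foldl_cons, hstep] at h
      rcases ih s h with ⟨q, hq, hq1, hq2⟩
      exact ⟨q, List.mem_cons_of_mem _ hq, hq1, by rw [List.foldl_cons, hstep]; exact hq2⟩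

lemma pvProgress (items : List (String × List String)) (s : PySem.Set String)
    (h : (items.foldl pvStepA (s, false)).2 = true) :
    (items.filter (fun p => !(PySem.Set.contains (items.foldl pvStepA (s, false)).1 p.1))).length <
      (items.filter (fun p => !(PySem.Set.contains s p.1))).length := by
  have hsub : (items.filter
        (fun p => !(PySem.Set.contains (items.foldl pvStepA (s, false)).1 p.1))).Sublist
      (items.filter (fun p => !(PySem.Set.contains s p.1))) := by
    apply List.monotone_filter_right
    intro q hq
    cases hcv : PySem.Set.contains s q.1
    · simp
    · exfalso
      have hmem : q.1 ∈ (items.foldl pvStepA (s, false)).1 :=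
        pvFoldA_mono items (s, false) q.1 ((PySem.Set.contains_iff s q.1).mp hcv)
      have hq' : q.1 ∉ (items.foldl pvStepA (s, false)).1 := by simpa using hq
      exact hq' hmem
  rcases pvFoldA_changed_witness items s h with ⟨p, hpmem, hp1, hp2⟩
  have hle := hsub.length_le
  rcases Nat.lt_or_ge (items.filter
      (fun p => !(PySem.Set.contains (items.foldl pvStepA (s, false)).1 p.1))).length
      (items.filter (fun p => !(PySem.Set.contains s p.1))).length with hlt | hge
  · exact hlt
  · exfalso
    have heq := hsub.eq_of_length (Nat.le_antisymm hle hge)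
    have hin : p ∈ items.filter (fun p => !(PySem.Set.contains s p.1)) := by
      rw [List.mem_filter]
      exact ⟨hpmem, by simpa using (pvContains_eq_false_iff s p.1).mp hp1⟩
    rw [← heq, List.mem_filter] at hin
    have h5 : p.1 ∉ (items.foldl pvStepA (s, false)).1 := by simpa using hin.2
    exact h5 hp2

lemma pvLoopA_mono (items : List (String × List String)) :
    ∀ (fuel : Nat) (s : PySem.Set String) (x : String), x ∈ s → x ∈ pvLoopA items fuel s := by
  intro fuel
  induction fuel with
  | zero => intro s x hx; exact hx
  | succ n ih =>
    intro s x hx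
    simp only [pvLoopA]
    split
    · exact ih _ x (pvFoldA_mono items (s, false) x hx)
    · exact pvFoldA_mono items (s, false) x hx

lemma pvLoopA_nodup (items : List (String × List String)) :
    ∀ (fuel : Nat) (s : PySem.Set String), s.Nodup → (pvLoopA items fuel s).Nodup := by
  intro fuel
  induction fuel with
  | zero => intro s h; exact h
  | succ n ih =>
    intro s h
    simp only [pvLoopA]
    split
    · exact ih _ (pvFoldA_nodup items (s, false) h)
    · exact pvFoldA_nodup items (s, false) h

lemma pvLoopA_sub (items : List (String × List String)) (S : List String) (hS : pvClosed items S) :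
    ∀ (fuel : Nat) (s : PySem.Set String), (∀ x ∈ s, x ∈ S) →
      ∀ x ∈ pvLoopA items fuel s, x ∈ S := by
  intro fuel
  induction fuel with
  | zero => intro s h; exact h
  | succ n ih =>
    intro s h
    simp only [pvLoopA]
    split
    · exact ih _ (pvFoldA_sub items S hS (s, false) h)
    · exact pvFoldA_sub items S hS (s, false) h

lemma pvLoopA_closed (items : List (String × List String)) :
    ∀ (fuel : Nat) (s : PySem.Set String),
      (items.filter (fun p => !(PySem.Set.contains s p.1))).length < fuel →
      pvClosed items (pvLoopA items fuel s) := by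
  intro fuel
  induction fuel with
  | zero => intro s hlt; omega
  | succ n ih =>
    intro s hlt
    simp only [pvLoopA]
    cases hch : (items.foldl pvStepA (s, false)).2
    · simp only [Bool.false_eq_true, if_false]
      rcases pvFoldA_unchanged items s hch with ⟨heq, hstable⟩
      rw [heq]
      intro p hp ⟨c, hc1, hc2⟩
      rcases hstable p hp with hcase | hcase
      · exact (PySem.Set.contains_iff s p.1).mp hcase
      · exfalso
        have : pvHit s p = true := (pvHit_iff s p).mpr ⟨c, hc1, hc2⟩
        rw [this] at hcase; exact absurd hcase (by simp)
    · simp only [if_true]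
      have hlt2 := pvProgress items s hch
      exact ih _ (by omega)

-- B-side: the reverse adjacency lists exactly the callers of each callee
lemma pvRev_aux (m c : String) :
    ∀ (items : List (String × List String)) (d : PySem.Dict String (List String)),
      c ∈ (items.foldl
            (fun d p => (PySem.Set.ofList p.2).foldl (fun d c => d.modify c [] (fun l => l ++ [p.1])) d)
            d).getD m [] ↔
        c ∈ d.getD m [] ∨ ∃ p ∈ items, p.1 = c ∧ m ∈ p.2 := by
  intro items
  induction items with
  | nil => intro d; simp
  | cons p rest ih =>
    intro d
    rw [List.foldl_cons, ih]
    have hinner :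
        ((PySem.Set.ofList p.2).foldl (fun d c => d.modify c [] (fun l => l ++ [p.1])) d).getD m [] =
          d.getD m [] ++
            (((PySem.Set.ofList p.2).map (fun c => (c, p.1))).filter (fun q => q.1 == m)).map
              (fun q => q.2) := by
    -- library grouping-loop lemma, pulled back through List.foldl_map
      have h := PySem.Dict.getD_foldl_modify_append
        ((PySem.Set.ofList p.2).map (fun c => (c, p.1))) d m
      rw [List.foldl_map] at h
      simpa using h
    have hmem2 : c ∈ (((PySem.Set.ofList p.2).map (fun c => (c, p.1))).filter
        (fun q => q.1 == m)).map (fun q => q.2) ↔ p.1 = c ∧ m ∈ p.2 := by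
      simp only [List.mem_map, List.mem_filter, PySem.Set.mem_ofList, beq_iff_eq]
      constructor
      · rintro ⟨q, ⟨⟨c0, hc0, rfl⟩, hq⟩, rfl⟩
        simp only at hq
        subst hq
        exact ⟨rfl, hc0⟩
      · rintro ⟨h1, h2⟩
        exact ⟨(m, p.1), ⟨⟨m, h2, rfl⟩, rfl⟩, h1⟩
    rw [hinner, List.mem_append, hmem2]
    constructor
    · rintro ((hd | ⟨h1, h2⟩) | ⟨p', hp', h1, h2⟩)
      · exact Or.inl hd
      · exact Or.inr ⟨p, List.mem_cons_self, h1, h2⟩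
      · exact Or.inr ⟨p', List.mem_cons_of_mem _ hp', h1, h2⟩
    · rintro (hd | ⟨p', hp', h1, h2⟩)
      · exact Or.inl (Or.inl hd)
      · rcases List.mem_cons.mp hp' with rfl | hp'
        · exact Or.inl (Or.inr ⟨h1, h2⟩)
        · exact Or.inr ⟨p', hp', h1, h2⟩

lemma pvRev_mem (items : List (String × List String)) (m c : String) :
    c ∈ (pvRev items).getD m [] ↔ ∃ p ∈ items, p.1 = c ∧ m ∈ p.2 := by
  unfold pvRev
  rw [pvRev_aux]
  simp [PySem.Dict.empty, PySem.Dict.getD, PySem.Dict.get?]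

-- closure under the reverse adjacency = closure under the call map
lemma pvClosedRev_iff (items : List (String × List String)) (S : List String) :
    (∀ m ∈ S, ∀ c ∈ (pvRev items).getD m [], c ∈ S) ↔ pvClosed items S := by
  constructor
  · intro h p hp ⟨c0, hc1, hc2⟩
    exact h c0 hc2 p.1 ((pvRev_mem items c0 p.1).mpr ⟨p, hp, rfl, hc1⟩)
  · intro h m hm c hc
    rcases (pvRev_mem items m c).mp hc with ⟨p, hp, rfl, hmem⟩
    exact h p hp ⟨m, hmem, hm⟩

-- one inner loop of B: membership, the new stack, nodup, kept stack entries, pushed entries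
lemma pvVisit_fold (l : List String) :
    ∀ (exp : PySem.Set String) (stack : List String),
      (∀ x, x ∈ (l.foldl pvVisit (exp, stack)).1 ↔ x ∈ exp ∨ x ∈ l) ∧
      (∀ x ∈ (l.foldl pvVisit (exp, stack)).2, x ∈ stack ∨ x ∈ l) ∧
      (exp.Nodup → (l.foldl pvVisit (exp, stack)).1.Nodup) ∧
      (∀ x ∈ stack, x ∈ (l.foldl pvVisit (exp, stack)).2) ∧
      (∀ x ∈ l, x ∉ exp → x ∈ (l.foldl pvVisit (exp, stack)).2) := by
  induction l with
  | nil => intro exp stack; simp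
  | cons c rest ih =>
    intro exp stack
    rw [List.foldl_cons]
    by_cases hc : PySem.Set.contains exp c = true
    · have hcm : c ∈ exp := (PySem.Set.contains_iff exp c).mp hc
      have hstep : pvVisit (exp, stack) c = (exp, stack) := by simp [pvVisit, hcm]
      rw [hstep]
      obtain ⟨P1, P2, P3, P4, P5⟩ := ih exp stack
      refine ⟨fun x => ?_, fun x hx => ?_, P3, P4, fun x hx hnx => ?_⟩
      · rw [P1, List.mem_cons]
        constructor
        · rintro (h | h)
          · exact Or.inl h
          · exact Or.inr (Or.inr h)
        · rintro (h | rfl | h)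
          · exact Or.inl h
          · exact Or.inl hcm
          · exact Or.inr h
      · rcases P2 x hx with h | h
        · exact Or.inl h
        · exact Or.inr (List.mem_cons_of_mem _ h)
      · rcases List.mem_cons.mp hx with rfl | hx
        · exact absurd hcm hnx
        · exact P5 x hx hnx
    · have hcm : c ∉ exp := by
        intro h; exact hc ((PySem.Set.contains_iff exp c).mpr h)
      have hstep : pvVisit (exp, stack) c = (PySem.Set.add exp c, c :: stack) := by
        simp [pvVisit, hcm]
      rw [hstep]
      obtain ⟨P1, P2, P3, P4, P5⟩ := ih (PySem.Set.add exp c) (c :: stack)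
      refine ⟨fun x => ?_, fun x hx => ?_, fun hnd => P3 (PySem.Set.nodup_add exp c hnd),
        fun x hx => P4 x (List.mem_cons_of_mem _ hx), fun x hx hnx => ?_⟩
      · rw [P1, PySem.Set.mem_add, List.mem_cons]
        tauto
      · rcases P2 x hx with h | h
        · rcases List.mem_cons.mp h with rfl | h
          · exact Or.inr List.mem_cons_self
          · exact Or.inl h
        · exact Or.inr (List.mem_cons_of_mem _ h)
      · rcases List.mem_cons.mp hx with rfl | hx
        · exact P4 x List.mem_cons_self
        · by_cases hxc : x = c
          · subst hxc; exact P4 x List.mem_cons_self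
          · refine P5 x hx ?_
            intro hmem
            rcases (PySem.Set.mem_add exp c x).mp hmem with h | h
            · exact hnx h
            · exact hxc h

lemma pvContains_add_ne (s : PySem.Set String) (x y : String) (h : y ≠ x) :
    PySem.Set.contains (PySem.Set.add s x) y = PySem.Set.contains s y := by
  have h1 := PySem.Set.contains_iff (PySem.Set.add s x) y
  have h2 := PySem.Set.contains_iff s y
  have h3 := PySem.Set.mem_add s x y
  cases hc1 : PySem.Set.contains (PySem.Set.add s x) y <;>
    cases hc2 : PySem.Set.contains s y <;> simp_all

-- adding one fresh universe member shrinks the not-yet-expanded count by exactly one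
lemma pvMissing_add (exp : PySem.Set String) (c : String) (hnc : c ∉ exp) :
    ∀ (U : List String), U.Nodup → c ∈ U →
      (U.filter (fun u => !(PySem.Set.contains (PySem.Set.add exp c) u))).length + 1 =
        (U.filter (fun u => !(PySem.Set.contains exp u))).length := by
  intro U
  induction U with
  | nil => intro _ h; simp at h
  | cons u rest ih =>
    intro hnd hc
    rcases List.nodup_cons.mp hnd with ⟨hu, hnd'⟩
    by_cases huc : u = c
    · subst huc
      have h1 : PySem.Set.contains (PySem.Set.add exp u) u = true :=
        (PySem.Set.contains_iff _ _).mpr ((PySem.Set.mem_add exp u u).mpr (Or.inr rfl))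
      have h2 : PySem.Set.contains exp u = false := (pvContains_eq_false_iff exp u).mpr hnc
      rw [List.filter_cons, List.filter_cons, h1, h2]
      simp only [Bool.not_true, Bool.not_false, Bool.false_eq_true, if_false, if_true,
        List.length_cons]
      have hcong : rest.filter (fun x => !(PySem.Set.contains (PySem.Set.add exp u) x)) =
          rest.filter (fun x => !(PySem.Set.contains exp x)) := by
        apply List.filter_congr
        intro x hx
        rw [pvContains_add_ne exp u x (by rintro rfl; exact hu hx)]
      rw [hcong]
    · have hcr : c ∈ rest := by
        rcases List.mem_cons.mp hc with h | h
        · exact absurd h.symm huc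
        · exact h
      have heq : PySem.Set.contains (PySem.Set.add exp c) u = PySem.Set.contains exp u :=
        pvContains_add_ne exp c u huc
      rw [List.filter_cons, List.filter_cons, heq]
      cases PySem.Set.contains exp u
      · simp only [Bool.not_false, if_true, List.length_cons]
        have := ih hnd' hcr
        omega
      · simp only [Bool.not_true, Bool.false_eq_true, if_false]
        exact ih hnd' hcr

-- the measure: stack size plus the number of universe members not yet expanded
lemma pvVisit_fold_measure (U : List String) (hU : U.Nodup) (l : List String)
    (hl : ∀ x ∈ l, x ∈ U) :
    ∀ (exp : PySem.Set String) (stack : List String),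
      (l.foldl pvVisit (exp, stack)).2.length +
        (U.filter (fun u => !(PySem.Set.contains (l.foldl pvVisit (exp, stack)).1 u))).length =
      stack.length + (U.filter (fun u => !(PySem.Set.contains exp u))).length := by
  induction l with
  | nil => intro exp stack; rfl
  | cons c rest ih =>
    intro exp stack
    have hl' : ∀ x ∈ rest, x ∈ U := fun x hx => hl x (List.mem_cons_of_mem _ hx)
    rw [List.foldl_cons]
    by_cases hc : PySem.Set.contains exp c = true
    · have hcm : c ∈ exp := (PySem.Set.contains_iff exp c).mp hc
      have hstep : pvVisit (exp, stack) c = (exp, stack) := by simp [pvVisit, hcm]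
      rw [hstep]
      exact ih hl' exp stack
    · have hnc : c ∉ exp := fun h => hc ((PySem.Set.contains_iff exp c).mpr h)
      have hstep : pvVisit (exp, stack) c = (PySem.Set.add exp c, c :: stack) := by
        simp [pvVisit, hnc]
      rw [hstep]
      have h1 := ih hl' (PySem.Set.add exp c) (c :: stack)
      have h2 := pvMissing_add exp c hnc U hU (hl c List.mem_cons_self)
      simp only [List.length_cons] at h1 ⊢
      omega

lemma pvBFS_mono (rev : PySem.Dict String (List String)) :
    ∀ (fuel : Nat) (stack : List String) (exp : PySem.Set String) (x : String),
      x ∈ exp → x ∈ pvBFS rev fuel stack exp := by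
  intro fuel
  induction fuel with
  | zero => intro stack exp x hx; exact hx
  | succ n ih =>
    intro stack exp x hx
    cases stack with
    | nil => exact hx
    | cons m rest =>
      simp only [pvBFS]
      obtain ⟨P1, _, _, _, _⟩ := pvVisit_fold (rev.getD m []) exp rest
      exact ih _ _ x ((P1 x).mpr (Or.inl hx))

lemma pvBFS_nodup (rev : PySem.Dict String (List String)) :
    ∀ (fuel : Nat) (stack : List String) (exp : PySem.Set String),
      exp.Nodup → (pvBFS rev fuel stack exp).Nodup := by
  intro fuel
  induction fuel with
  | zero => intro stack exp h; exact h
  | succ n ih =>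
    intro stack exp h
    cases stack with
    | nil => exact h
    | cons m rest =>
      simp only [pvBFS]
      obtain ⟨_, _, P3, _, _⟩ := pvVisit_fold (rev.getD m []) exp rest
      exact ih _ _ (P3 h)

lemma pvBFS_sub (rev : PySem.Dict String (List String)) (S : List String)
    (hS : ∀ m ∈ S, ∀ c ∈ rev.getD m [], c ∈ S) :
    ∀ (fuel : Nat) (stack : List String) (exp : PySem.Set String),
      (∀ x ∈ exp, x ∈ S) → (∀ x ∈ stack, x ∈ exp) →
      ∀ x ∈ pvBFS rev fuel stack exp, x ∈ S := by
  intro fuel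
  induction fuel with
  | zero => intro stack exp hexp _ x hx; exact hexp x hx
  | succ n ih =>
    intro stack exp hexp hstack x hx
    cases stack with
    | nil => exact hexp x hx
    | cons m rest =>
      simp only [pvBFS] at hx
      obtain ⟨P1, P2, _, _, _⟩ := pvVisit_fold (rev.getD m []) exp rest
      have hmS : m ∈ S := hexp m (hstack m List.mem_cons_self)
      have hlS : ∀ c ∈ rev.getD m [], c ∈ S := hS m hmS
      refine ih _ _ ?_ ?_ x hx
      · intro y hy
        rcases (P1 y).mp hy with h | h
        · exact hexp y h
        · exact hlS y h
      · intro y hy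
        rcases P2 y hy with h | h
        · exact (P1 y).mpr (Or.inl (hstack y (List.mem_cons_of_mem _ h)))
        · exact (P1 y).mpr (Or.inr h)

lemma pvBFS_closed (rev : PySem.Dict String (List String)) (U : List String) (hU : U.Nodup)
    (hrange : ∀ m : String, ∀ c ∈ rev.getD m [], c ∈ U) :
    ∀ (fuel : Nat) (stack : List String) (exp : PySem.Set String),
      (∀ x ∈ stack, x ∈ exp) →
      (∀ m ∈ exp, m ∉ stack → ∀ c ∈ rev.getD m [], c ∈ exp) →
      stack.length + (U.filter (fun u => !(PySem.Set.contains exp u))).length < fuel →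
      ∀ m ∈ pvBFS rev fuel stack exp, ∀ c ∈ rev.getD m [], c ∈ pvBFS rev fuel stack exp := by
  intro fuel
  induction fuel with
  | zero => intro stack exp _ _ hlt; omega
  | succ n ih =>
    intro stack exp hstack hInv hlt
    cases stack with
    | nil =>
      intro m hm c hc
      exact hInv m hm (by simp) c hc
    | cons m rest =>
      simp only [pvBFS]
      obtain ⟨P1, P2, _, P4, P5⟩ := pvVisit_fold (rev.getD m []) exp rest
      have hmeas := pvVisit_fold_measure U hU (rev.getD m []) (hrange m) exp rest
      refine ih _ _ ?_ ?_ ?_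
      · intro y hy
        rcases P2 y hy with h | h
        · exact (P1 y).mpr (Or.inl (hstack y (List.mem_cons_of_mem _ h)))
        · exact (P1 y).mpr (Or.inr h)
      · intro m' hm' hnotin c hc
        rcases (P1 m').mp hm' with hexp' | hl
        · by_cases hms : m' ∈ m :: rest
          · rcases List.mem_cons.mp hms with rfl | hms
            · exact (P1 c).mpr (Or.inr hc)
            · exact absurd (P4 m' hms) hnotin
          · exact (P1 c).mpr (Or.inl (hInv m' hexp' hms c hc))
        · by_cases hexp' : m' ∈ exp
          · by_cases hms : m' ∈ m :: rest
            · rcases List.mem_cons.mp hms with rfl | hms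
              · exact (P1 c).mpr (Or.inr hc)
              · exact absurd (P4 m' hms) hnotin
            · exact (P1 c).mpr (Or.inl (hInv m' hexp' hms c hc))
          · exact absurd (P5 m' hl hexp') hnotin
      · simp only [List.length_cons] at hlt
        omega

-- ===== VERDICT (by name: the statement is the Claim_ definition above) =====
theorem expand_modified_members_transitively_py_spec : Claim_equal_expand_modified_members_transitively_py := by
  intro dm ic _
  unfold Spec_expand_modified_members_transitively_py
  unfold expand_modified_members_transitively_py expand_modified_members_transitively_py_alt
  dsimp only
  set items := (pvCallDict ic).items with hitems
  set rev := pvRev items with hrev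
  set seeds := PySem.Set.ofList dm with hseeds
  set U : List String := PySem.Set.update (PySem.Set.ofList dm) (items.map Prod.fst) with hU
  set RA := pvLoopA items (items.length + 1) seeds with hRA
  set fuelB := 2 * (seeds.length + items.length) + 1 with hfuelB
  set RB := pvBFS rev fuelB seeds seeds with hRB
  -- facts about the universe
  have hUnd : U.Nodup := PySem.Set.nodup_update _ _ (PySem.Set.nodup_ofList dm)
  have hrange : ∀ m : String, ∀ c ∈ rev.getD m [], c ∈ U := by
    intro m c hc
    rcases (pvRev_mem items m c).mp hc with ⟨p, hp, rfl, _⟩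
    exact (PySem.Set.mem_update _ _ _).mpr (Or.inr (List.mem_map_of_mem hp))
  have hUlen : U.length ≤ seeds.length + items.length := by
    rw [hU, PySem.Set.update_eq_append_filter, List.length_append]
    have h1 := List.length_filter_le (fun y => !(PySem.Set.contains (PySem.Set.ofList dm) y))
      (PySem.Set.ofList (items.map Prod.fst))
    have h2 := PySem.Set.length_ofList_le (items.map Prod.fst)
    rw [List.length_map] at h2
    rw [hseeds]
    omega
  -- A's result: contains the seeds, closed, and minimal
  have hAseed : ∀ x ∈ seeds, x ∈ RA := fun x hx => pvLoopA_mono items _ seeds x hx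
  have hAclosed : pvClosed items RA := by
    refine pvLoopA_closed items _ seeds ?_
    have := List.length_filter_le (fun p => !(PySem.Set.contains seeds p.1)) items
    omega
  have hAnd : RA.Nodup := pvLoopA_nodup items _ seeds (PySem.Set.nodup_ofList dm)
  -- B's result: contains the seeds, closed, and minimal
  have hBseed : ∀ x ∈ seeds, x ∈ RB := fun x hx => pvBFS_mono rev fuelB seeds seeds x hx
  have hBclosed : pvClosed items RB := by
    refine (pvClosedRev_iff items RB).mp ?_
    refine pvBFS_closed rev U hUnd hrange fuelB seeds seeds (fun x hx => hx) ?_ ?_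
    · intro m hm hnot; exact absurd hm hnot
    · have := List.length_filter_le (fun u => !(PySem.Set.contains seeds u)) U
      omega
  have hBnd : RB.Nodup := pvBFS_nodup rev fuelB seeds seeds (PySem.Set.nodup_ofList dm)
  -- the two results are the same set
  have hAB : ∀ x ∈ RA, x ∈ RB := pvLoopA_sub items RB hBclosed _ seeds hBseed
  have hBA : ∀ x ∈ RB, x ∈ RA :=
    pvBFS_sub rev RA ((pvClosedRev_iff items RA).mpr hAclosed) fuelB seeds seeds hAseed
      (fun x hx => hx)
  have hperm : RA.Perm RB :=
    (List.perm_ext_iff_of_nodup hAnd hBnd).mpr (fun a => ⟨hAB a, hBA a⟩)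
  exact PySem.List.sorted_eq_sorted_of_perm RA RB (fun x => x) (fun a b h => h) hperm
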